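-- pv_equiv track=rewrite | github.com/EvelynXie7/CSComps_CompressionMedicalImages_2025Fall | JPEG_entropy_decode.py | convert_decode
-- ===== SOURCE A (Python) =====
-- def convert_decode(byte_array)-> str:
--     """
--     Convert byte values into string of '0' and '1' characters.
--     Gets rid of byte stuffing.
--
--     Input:
--         byte_array - array of bytes to decode
--
--     Output:
--         block_code - string of '0' and '1' characters
--
--     """
--     block_code = ""
--     i = 0
--
--     while i < len(byte_array):
--         byte_value = byte_array[i]
--
--         # Convert byte to 8-bit binary string
--         block_code += format(byte_value, '08b')
--         i += 1
--
--         # Check for byte unstuffing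
--         if byte_value == 0xFF and i < len(byte_array) and byte_array[i] == 0x00:
--             # Skip the stuffed 0x00 byte
--             i += 1
--
--     return block_code
-- ===== SOURCE B (Python) =====
-- def convert_decode(byte_array) -> str:
--     # A byte is a stuffed 0x00 exactly when it equals 0 and its predecessor equals 0xFF:
--     # a skipped byte is always 0 (never 0xFF), so every 0xFF predecessor is itself emitted,
--     # making the sequential skip state unnecessary.  Keep by this local pairwise test, then join.
--     kept = [b for p, b in zip([None] + list(byte_array), byte_array)
--             if not (p == 255 and b == 0)]
--     return ''.join(format(b, '08b') for b in kept)
-- ===== Notes on version B (the rewrite author's own statement) =====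
-- stated objective: alternative
-- what changed: Replaces the stateful index-based skip loop by a stateless local characterization: a byte is dropped iff it equals 0 and its predecessor equals 255 (correct because skipped bytes are always 0, never 255), implemented as a zip-with-predecessor filter followed by one join.
import Mathlib
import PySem

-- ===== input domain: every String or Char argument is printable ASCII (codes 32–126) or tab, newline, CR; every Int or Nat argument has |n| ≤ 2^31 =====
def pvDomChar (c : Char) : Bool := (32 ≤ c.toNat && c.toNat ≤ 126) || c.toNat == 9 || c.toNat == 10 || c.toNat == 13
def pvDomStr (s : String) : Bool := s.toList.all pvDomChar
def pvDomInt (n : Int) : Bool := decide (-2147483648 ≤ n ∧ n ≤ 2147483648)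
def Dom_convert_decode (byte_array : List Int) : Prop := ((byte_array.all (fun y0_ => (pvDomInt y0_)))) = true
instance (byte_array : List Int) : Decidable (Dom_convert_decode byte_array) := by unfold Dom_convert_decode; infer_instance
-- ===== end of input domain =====

-- B replaces A's stateful index/skip loop by a stateless local test (drop a byte iff it is 0 and its
-- predecessor is 255), via a zip-with-predecessor filter and one join; objective: alternative.

-- shared primitive: Python's format(n, '08b') (binary, zero-padded to width 8, sign counted in the width)
def binDigits (n : Nat) : List Char :=
  if hz : n = 0 then []
  else binDigits (n / 2) ++ [if n % 2 = 1 then '1' else '0']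
termination_by n
decreasing_by exact Nat.div_lt_self (Nat.pos_of_ne_zero hz) (by omega)

def pyFormat08b (n : Int) : String :=
  if n < 0 then
    let s := binDigits n.natAbs
    String.ofList ('-' :: (List.replicate (8 - (s.length + 1)) '0' ++ s))
  else if n = 0 then "00000000"
  else
    let s := binDigits n.toNat
    String.ofList (List.replicate (8 - s.length) '0' ++ s)

-- ===== PORT A =====
-- the while loop: state (block_code, i); lookahead byte_array[i+1] as getElem? (some 0 ⟺ i+1 < len and value 0)
def convert_decode_go (l : List Int) (block_code : String) (i : Nat) : String :=
  if h : i < l.length then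
    let byte_value := l[i]
    let block_code := block_code ++ pyFormat08b byte_value
    if byte_value = 255 ∧ l[i + 1]? = some 0 then
      convert_decode_go l block_code (i + 2)
    else
      convert_decode_go l block_code (i + 1)
  else block_code
termination_by l.length - i

def convert_decode (byte_array : List Int) : String :=
  convert_decode_go byte_array "" 0

-- ===== PORT B =====
-- kept = [b for p, b in zip([None] + list(byte_array), byte_array) if not (p == 255 and b == 0)]
-- (the Python predecessor None / a byte becomes Option Int; None == 255 is False, i.e. none ≠ some 255)
def convert_decode_alt (byte_array : List Int) : String :=
  let kept := (((none :: byte_array.map some).zip byte_array).filter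
                 (fun pb => !(pb.1 == some (255 : Int) && pb.2 == (0 : Int)))).map (·.2)
  String.join (kept.map pyFormat08b)

-- ===== PRECONDITION & SPEC =====
def Spec_convert_decode (byte_array : List Int) (out : String) : Prop := out = convert_decode_alt byte_array
instance (byte_array : List Int) (out : String) : Decidable (Spec_convert_decode byte_array out) := by unfold Spec_convert_decode; infer_instance

-- ===== CLAIM (what is proved, stated in full; the proofs are below) =====
def Claim_equal_convert_decode : Prop := ∀ (byte_array : List Int), Dom_convert_decode byte_array → Spec_convert_decode byte_array (convert_decode byte_array)

-- ===== LEMMAS AND PROOFS =====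

-- reference function: stuffing removal + bit conversion as one structural recursion
def gRef : List Int → String
  | [] => ""
  | x :: t =>
    match t with
    | [] => pyFormat08b x
    | y :: t' =>
      if x = 255 ∧ y = 0 then pyFormat08b x ++ gRef t'
      else pyFormat08b x ++ gRef (y :: t')

-- the surviving bytes, parameterised by whether the predecessor is 255
def clean2 (flag : Bool) : List Int → List Int
  | [] => []
  | b :: t => if flag ∧ b = 0 then clean2 false t else b :: clean2 (decide (b = 255)) t

theorem zip_filter_clean2 (l : List Int) : ∀ (p : Option Int),
    (((p :: l.map some).zip l).filter
        (fun pb => !(pb.1 == some (255 : Int) && pb.2 == (0 : Int)))).map (·.2)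
      = clean2 (p == some 255) l := by
  induction l with
  | nil => intro p; simp [clean2]
  | cons b t ih =>
    intro p
    simp only [List.map_cons, List.zip_cons_cons, List.filter_cons]
    by_cases hb : p = some 255 ∧ b = 0
    · obtain ⟨hp, hb0⟩ := hb
      subst hp; subst hb0
      rw [if_neg (by decide)]
      rw [ih (some (0 : Int))]
      simp [clean2]
    · have hq : (!(p == some (255 : Int) && b == (0 : Int))) = true := by
        by_cases hp : p = some 255
        · have hb0 : b ≠ 0 := fun h => hb ⟨hp, h⟩
          simp [hp, hb0]
        · simp [hp]
      rw [if_pos hq]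
      simp only [List.map_cons]
      rw [ih (some b)]
      have hbe : (some b == some (255 : Int)) = decide (b = 255) := by
        by_cases h : b = 255 <;> simp [h]
      rw [hbe]
      have hflag : ¬ (((p == some (255 : Int)) = true) ∧ b = 0) := by
        intro ⟨h1, h2⟩; exact hb ⟨by simpa using h1, h2⟩
      simp only [clean2]
      rw [if_neg hflag]

theorem clean2_skipless (b : Int) (t : List Int) (flag : Bool) (hb : b ≠ 0) :
    clean2 flag (b :: t) = clean2 false (b :: t) := by
  simp [clean2, hb]

theorem join_aux (ss : List String) : ∀ (a : String),
    List.foldl (fun r s => r ++ s) a ss = a ++ List.foldl (fun r s => r ++ s) "" ss := by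
  induction ss with
  | nil => intro a; simp
  | cons s ss ih =>
    intro a
    simp only [List.foldl_cons]
    rw [ih, ih ("" ++ s)]
    simp [String.append_assoc]

theorem join_cons (s : String) (ss : List String) :
    String.join (s :: ss) = s ++ String.join ss := by
  show List.foldl (fun r s => r ++ s) "" (s :: ss) = s ++ List.foldl (fun r s => r ++ s) "" ss
  rw [List.foldl_cons, join_aux]
  simp

theorem clean2_gRef (l : List Int) :
    String.join ((clean2 false l).map pyFormat08b) = gRef l := by
  induction l using gRef.induct with
  | case1 => simp [clean2, gRef, String.join]
  | case2 x => simp [clean2, gRef, String.join]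
  | case3 x y t' hxy ih =>
    obtain ⟨hx, hy⟩ := hxy
    subst hx; subst hy
    have h1 : clean2 false ((255 : Int) :: 0 :: t') = 255 :: clean2 false t' := by
      simp [clean2]
    rw [h1, List.map_cons, join_cons, ih]
    simp [gRef]
  | case4 x y t' hxy ih =>
    show String.join ((clean2 false (x :: y :: t')).map pyFormat08b) = gRef (x :: y :: t')
    have h1 : clean2 false (x :: y :: t') = x :: clean2 (decide (x = 255)) (y :: t') := by
      simp [clean2]
    have h2 : clean2 (decide (x = 255)) (y :: t') = clean2 false (y :: t') := by
      by_cases hx255 : x = 255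
      · have hy0 : y ≠ 0 := by intro hy; exact hxy ⟨hx255, hy⟩
        exact clean2_skipless y t' _ hy0
      · simp [hx255]
    rw [h1, h2, List.map_cons, join_cons, ih]
    simp only [gRef]
    rw [if_neg hxy]

theorem convert_decode_go_eq (l : List Int) : ∀ (i : Nat) (acc : String),
    convert_decode_go l acc i = acc ++ gRef (l.drop i) := by
  have H : ∀ (k i : Nat), l.length - i ≤ k → ∀ acc,
      convert_decode_go l acc i = acc ++ gRef (l.drop i) := by
    intro k
    induction k with
    | zero =>
      intro i hk acc
      have hi : ¬ i < l.length := by omega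
      rw [convert_decode_go, dif_neg hi]
      rw [List.drop_eq_nil_of_le (by omega)]
      simp [gRef]
    | succ k ih =>
      intro i hk acc
      by_cases hi : i < l.length
      · have hdrop : l.drop i = l[i] :: l.drop (i + 1) := List.drop_eq_getElem_cons hi
        rw [convert_decode_go, dif_pos hi]
        by_cases hc : l[i] = 255 ∧ l[i + 1]? = some 0
        · rw [if_pos hc]
          obtain ⟨h255, hnext⟩ := hc
          have hi1 : i + 1 < l.length := by
            by_contra h
            rw [List.getElem?_eq_none (by omega)] at hnext
            simp at hnext
          have hdrop1 : l.drop (i + 1) = l[i + 1] :: l.drop (i + 2) :=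
            List.drop_eq_getElem_cons hi1
          have hv1 : l[i + 1] = 0 := by
            rw [List.getElem?_eq_getElem hi1] at hnext
            exact Option.some.inj hnext
          rw [ih (i + 2) (by omega)]
          rw [hdrop, hdrop1, hv1, h255]
          simp only [gRef, String.append_assoc]
          simp
        · rw [if_neg hc]
          rw [ih (i + 1) (by omega)]
          rw [hdrop]
          rcases hd1 : l.drop (i + 1) with _ | ⟨y, t'⟩
          · simp [gRef]
          · have hcc : ¬ (l[i] = 255 ∧ y = 0) := by
              intro ⟨h255, hy0⟩
              apply hc
              refine ⟨h255, ?_⟩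
              have : (l.drop (i + 1)).head? = some y := by rw [hd1]; rfl
              rw [List.head?_drop] at this
              rw [this, hy0]
            simp only [gRef, if_neg hcc]
            rw [String.append_assoc]
      · rw [convert_decode_go, dif_neg hi]
        rw [List.drop_eq_nil_of_le (by omega)]
        simp [gRef]
  intro i acc
  exact H (l.length - i) i (le_refl _) acc

-- ===== VERDICT (by name: the statement is the Claim_ definition above) =====
theorem convert_decode_spec : Claim_equal_convert_decode := by
  intro l _
  show convert_decode l = convert_decode_alt l
  rw [convert_decode, convert_decode_go_eq l 0 ""]
  rw [convert_decode_alt]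
  simp only [zip_filter_clean2 l none]
  have : ((none : Option Int) == some 255) = false := by rfl
  rw [this, clean2_gRef, List.drop_zero]
  simp
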